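-- pv_equiv track=rewrite | github.com/gast0xC/LiquidSeal-Robot | backend/update_rspt.py | generate_variant_thresholds
-- ===== SOURCE A (Python) =====
-- def filter_lines_with_decimals_from_content(content: str) -> list:
--     """
--     Filter lines from the content that contain decimal numbers and format them.
--
--     Args:
--         content (str): The content to filter.
--
--     Returns:
--         list: A list of filtered and formatted lines containing decimal numbers.
--     """
--     lines = content.splitlines()
--     decimal_lines = [line for line in lines if any('.' in word for word in line.split(','))]
--
--     processed_lines = []
--     for line in decimal_lines:
--         parts = line.split(',')
--         new_line = parts[0] + ','  # Start with the first part and a comma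
--         for i in range(1, len(parts)):
--             new_line += parts[i]
--             if (i < len(parts) - 1 and
--                 parts[i].strip().replace('.', '').isdigit() and
--                 parts[i + 1].strip().replace('.', '').isdigit()):
--                 new_line += ','
--         processed_lines.append(new_line.strip())  # Remove any trailing whitespace
--     return processed_lines
--
-- def generate_variant_thresholds(variant_program: str, existing_thresholds: str) -> str:
--     """
--     Generate variant thresholds based on the filtered lines from the variant program.
--     If existing thresholds are present, use them instead of generating new ones.
--
--     Args:
--         variant_program (str): The content of the variant program.
--         existing_thresholds (str): Existing thresholds in CSV format.
--
--     Returns: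
--         str: A string of thresholds in CSV format.
--     """
--     if existing_thresholds:
--         return existing_thresholds
--
--     filtered_lines = filter_lines_with_decimals_from_content(variant_program)
--     total_lines = len(filtered_lines)
--     num_thresholds = total_lines // 2
--     thresholds = "\n".join(f"{i+1},0.3" for i in range(num_thresholds))
--     return thresholds
-- ===== SOURCE B (Python) =====
-- def generate_variant_thresholds(variant_program: str, existing_thresholds: str) -> str:
--     if existing_thresholds:
--         return existing_thresholds
--     rows = []
--     pending = False
--     for line in variant_program.splitlines():
--         if '.' in line:
--             if pending:
--                 rows.append(f"{len(rows) + 1},0.3")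
--                 pending = False
--             else:
--                 pending = True
--     return "\n".join(rows)
-- ===== Notes on version B (the rewrite author's own statement) =====
-- stated objective: simpler
-- what changed: B replaces A's staged pipeline (helper that splits each line into fields, reformats and collects decimal lines; then count, floor-divide by 2, and a range-based join) with one streaming pass: a pending/paired toggle over the lines, emitting a threshold row immediately each time a pair of '.'-containing lines completes; no helper, no count, no //2, no range.
import Mathlib
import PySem

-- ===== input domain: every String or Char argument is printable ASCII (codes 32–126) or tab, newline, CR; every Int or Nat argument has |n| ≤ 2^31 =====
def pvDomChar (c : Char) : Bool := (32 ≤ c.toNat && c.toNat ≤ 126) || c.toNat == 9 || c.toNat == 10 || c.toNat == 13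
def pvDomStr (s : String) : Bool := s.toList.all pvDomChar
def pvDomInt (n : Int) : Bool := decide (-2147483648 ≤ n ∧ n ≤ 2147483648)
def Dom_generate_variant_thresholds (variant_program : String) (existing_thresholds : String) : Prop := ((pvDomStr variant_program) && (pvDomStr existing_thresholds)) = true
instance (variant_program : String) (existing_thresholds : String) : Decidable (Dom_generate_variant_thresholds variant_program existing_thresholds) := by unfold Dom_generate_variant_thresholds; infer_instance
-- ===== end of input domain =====

-- B replaces A's staged pipeline (reformat helper, count, //2, range-join) with one streaming pass that pairs '.'-lines and emits rows incrementally; objective: simpler.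


-- ===== PORT A =====
-- helper: filter_lines_with_decimals_from_content (literal transliteration).
-- line.split(',') has a non-empty separator, so Python never raises: split? is some, ported via .getD [].
-- parts[0] / parts[i] / parts[i+1] are always in range in Python (split returns a non-empty list and
-- i ranges over range(1, len(parts)) with the parts[i+1] access guarded by i < len(parts)-1), so pyGetD with default "" is exact.
def pvFilterDecimals (content : String) : List String :=
  let lines := PySem.Str.splitlines content
  let decimal_lines := lines.filter (fun line =>
    ((PySem.Str.split? line ",").getD []).any (fun word => PySem.Str.isIn "." word))
  decimal_lines.foldl (fun processed_lines line =>
    let parts := (PySem.Str.split? line ",").getD []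
    let new_line := PySem.List.pyGetD parts 0 "" ++ ","
    let new_line := (PySem.List.pyRange 1 (PySem.List.len parts) 1).foldl (fun nl i =>
      let nl := nl ++ PySem.List.pyGetD parts i ""
      if i < PySem.List.len parts - 1 &&
         PySem.Str.strIsdigit (PySem.Str.replace (PySem.Str.strip (PySem.List.pyGetD parts i "")) "." "") &&
         PySem.Str.strIsdigit (PySem.Str.replace (PySem.Str.strip (PySem.List.pyGetD parts (i+1) "")) "." "")
      then nl ++ "," else nl) new_line
    processed_lines ++ [PySem.Str.strip new_line]) []

def generate_variant_thresholds (variant_program : String) (existing_thresholds : String) : String :=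
  if existing_thresholds ≠ "" then existing_thresholds
  else
    let filtered_lines := pvFilterDecimals variant_program
    let total_lines : Int := PySem.List.len filtered_lines
    let num_thresholds := PySem.Int.floordiv total_lines 2
    PySem.Str.join "\n" ((PySem.List.pyRange 0 num_thresholds 1).map
      (fun i => PySem.Int.toStr (i + 1) ++ ",0.3"))

-- ===== PORT B =====
-- single pass over the lines with state (rows, pending): a '.'-line either sets pending or,
-- if one is already pending, completes a pair and appends the next threshold row at once
def generate_variant_thresholds_alt (variant_program : String) (existing_thresholds : String) : String :=
  if existing_thresholds ≠ "" then existing_thresholds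
  else
    let st := (PySem.Str.splitlines variant_program).foldl
      (fun (st : List String × Bool) line =>
        if PySem.Str.isIn "." line then
          if st.2 then (st.1 ++ [PySem.Int.toStr (PySem.List.len st.1 + 1) ++ ",0.3"], false)
          else (st.1, true)
        else st) ([], false)
    PySem.Str.join "\n" st.1

-- ===== PRECONDITION & SPEC =====
def Spec_generate_variant_thresholds (variant_program : String) (existing_thresholds : String) (out : String) : Prop := out = generate_variant_thresholds_alt variant_program existing_thresholds
instance (variant_program : String) (existing_thresholds : String) (out : String) : Decidable (Spec_generate_variant_thresholds variant_program existing_thresholds out) := by unfold Spec_generate_variant_thresholds; infer_instance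

-- ===== CLAIM (what is proved, stated in full; the proofs are below) =====
def Claim_equal_generate_variant_thresholds : Prop := ∀ (variant_program : String) (existing_thresholds : String), Dom_generate_variant_thresholds variant_program existing_thresholds → Spec_generate_variant_thresholds variant_program existing_thresholds (generate_variant_thresholds variant_program existing_thresholds)

-- ===== LEMMAS AND PROOFS =====

-- a singleton list is an infix exactly when its element is a member
theorem pv_singleton_infix_iff {α : Type} (a : α) (l : List α) : [a] <:+: l ↔ a ∈ l := by
  constructor
  · intro h; exact h.sublist.subset (List.mem_singleton_self a)
  · intro h
    rcases List.append_of_mem h with ⟨s, t, rfl⟩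
    exact ⟨s, t, by simp⟩

-- characters reachable from splitOn.go, for a single-char separator distinct from c
theorem pv_go_mem (c sepc : Char) (h : c ≠ sepc) :
    ∀ (fuel : Nat) (l cur : List Char) (acc : List (List Char)),
    (∃ w ∈ PySem.Chars.splitOn.go [sepc] fuel l cur acc, c ∈ w) ↔
      (∃ w ∈ acc, c ∈ w) ∨ c ∈ cur ∨ c ∈ l := by
  intro fuel
  induction fuel with
  | zero =>
    intro l cur acc
    simp only [PySem.Chars.splitOn.go]
    simp [or_assoc, or_comm]
  | succ fuel ih =>
    intro l cur acc
    cases l with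
    | nil =>
      simp only [PySem.Chars.splitOn.go]
      simp [or_comm]
    | cons c' rest =>
      simp only [PySem.Chars.splitOn.go]
      by_cases hp : [sepc].isPrefixOf (c' :: rest) = true
      · have hc : c' = sepc := by
          simp [List.isPrefixOf] at hp; exact hp.symm
        rw [if_pos hp, ih]
        subst hc
        simp only [List.mem_cons, List.length_cons, List.length_nil,
          List.drop_succ_cons, List.drop_zero, List.not_mem_nil, false_or]
        constructor
        · rintro (⟨w, hw | hw, hcw⟩ | hrest)
          · exact Or.inr (Or.inl (by rwa [hw, List.mem_reverse] at hcw))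
          · exact Or.inl ⟨w, hw, hcw⟩
          · exact Or.inr (Or.inr (Or.inr hrest))
        · rintro (⟨w, hw, hcw⟩ | hcur | hc | hrest)
          · exact Or.inl ⟨w, Or.inr hw, hcw⟩
          · exact Or.inl ⟨cur.reverse, Or.inl rfl, by rwa [List.mem_reverse]⟩
          · exact absurd hc h
          · exact Or.inr hrest
      · rw [if_neg hp, ih]
        simp only [List.mem_cons]
        constructor
        · rintro (ha | (hc | hcur) | hrest)
          · exact Or.inl ha
          · exact Or.inr (Or.inr (Or.inl hc))
          · exact Or.inr (Or.inl hcur)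
          · exact Or.inr (Or.inr (Or.inr hrest))
        · rintro (ha | hcur | hc | hrest)
          · exact Or.inl ha
          · exact Or.inr (Or.inl (Or.inr hcur))
          · exact Or.inr (Or.inl (Or.inl hc))
          · exact Or.inr (Or.inr hrest)

-- a character other than the separator occurs in some piece of split(',') iff it occurs in the line
theorem pv_splitOn_mem (c : Char) (cs : List Char) (h : c ≠ ',') :
    (∃ w ∈ PySem.Chars.splitOn cs [','], c ∈ w) ↔ c ∈ cs := by
  rw [show PySem.Chars.splitOn cs [','] = PySem.Chars.splitOn.go [','] (cs.length + 1) cs [] [] from rfl,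
    pv_go_mem c ',' h]
  simp

-- A's per-field filter test equals "line contains '.'"
theorem pv_pred_eq (line : String) :
    (((PySem.Str.split? line ",").getD []).any (fun word => PySem.Str.isIn "." word)) =
      PySem.Str.isIn "." line := by
  have hsplit : PySem.Str.split? line "," =
      some ((PySem.Chars.splitOn line.toList [',']).map String.ofList) := by
    simp [PySem.Str.split?, PySem.Chars.split?]
  rw [hsplit]
  simp only [Option.getD_some, List.any_map]
  rw [Bool.eq_iff_iff, List.any_eq_true]
  constructor
  · rintro ⟨w, hw, hcw⟩
    rw [Function.comp_apply, PySem.Str.isIn_iff_infix] at hcw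
    have hmem : ('.' : Char) ∈ w := by
      have := (pv_singleton_infix_iff ('.' : Char) (String.ofList w).toList).1 (by simpa using hcw)
      simpa [String.toList_ofList] using this
    have hline : ('.' : Char) ∈ line.toList :=
      (pv_splitOn_mem '.' line.toList (by decide)).1 ⟨w, hw, hmem⟩
    rw [PySem.Str.isIn_iff_infix]
    simpa using (pv_singleton_infix_iff ('.' : Char) line.toList).2 hline
  · intro hb
    rw [PySem.Str.isIn_iff_infix] at hb
    have hline : ('.' : Char) ∈ line.toList :=
      (pv_singleton_infix_iff _ _).1 (by simpa using hb)
    obtain ⟨w, hw, hcw⟩ := (pv_splitOn_mem '.' line.toList (by decide)).2 hline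
    refine ⟨w, hw, ?_⟩
    rw [Function.comp_apply, PySem.Str.isIn_iff_infix]
    simpa [String.toList_ofList] using
      (pv_singleton_infix_iff ('.' : Char) (String.ofList w).toList).2 (by simpa [String.toList_ofList] using hcw)

-- A's helper returns one string per decimal line: its length is the count of lines containing '.'
theorem pv_len_filterDecimals (content : String) :
    (pvFilterDecimals content).length =
      (PySem.Str.splitlines content).countP (fun line => PySem.Str.isIn "." line) := by
  unfold pvFilterDecimals
  rw [PySem.List.foldl_append_singleton_eq_map]
  simp only [List.nil_append, List.length_map]
  rw [List.countP_eq_length_filter]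
  congr 1
  exact List.filter_congr (fun line _ => pv_pred_eq line)

-- the threshold row for index i (0-based)
def pvRow (i : Nat) : String := PySem.Int.toStr ((i : Int) + 1) ++ ",0.3"

-- invariant of B's streaming pairing loop: starting from r completed rows and a pending bit b,
-- the rows after the fold are the first r + (count + b) / 2 threshold rows
theorem pv_loop_inv (ls : List String) :
    ∀ (r : Nat) (b : Bool),
      (ls.foldl (fun (st : List String × Bool) line =>
        if PySem.Str.isIn "." line then
          if st.2 then (st.1 ++ [PySem.Int.toStr (PySem.List.len st.1 + 1) ++ ",0.3"], false)
          else (st.1, true)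
        else st) ((List.range r).map pvRow, b)).1 =
      (List.range (r + (ls.countP (fun line => PySem.Str.isIn "." line) + (if b then 1 else 0)) / 2)).map pvRow := by
  induction ls with
  | nil =>
    intro r b
    cases b <;> simp [List.foldl]
  | cons l ls ih =>
    intro r b
    simp only [List.foldl_cons, List.countP_cons]
    by_cases hp : PySem.Str.isIn "." l = true
    · rw [hp]
      simp only [if_true]
      cases b with
      | false =>
        simp only [Bool.false_eq_true, if_false]
        rw [ih r true]
        congr 2
      | true =>
        simp only [if_true]
        have hlen : PySem.List.len ((List.range r).map pvRow) = (r : Int) := by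
          simp [PySem.List.len]
        rw [hlen]
        have hrows : (List.range r).map pvRow ++ [PySem.Int.toStr ((r : Int) + 1) ++ ",0.3"] =
            (List.range (r + 1)).map pvRow := by
          rw [List.range_succ, List.map_append]
          rfl
        rw [hrows, ih (r + 1) false]
        congr 2
        simp only [Bool.false_eq_true, if_false, Nat.add_zero]
        omega
    · simp only [Bool.not_eq_true] at hp
      rw [hp]
      simp only [Bool.false_eq_true, if_false]
      rw [ih r b]
      congr 2

-- ===== VERDICT (by name: the statement is the Claim_ definition above) =====
theorem generate_variant_thresholds_spec : Claim_equal_generate_variant_thresholds := by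
  intro vp et _
  unfold Spec_generate_variant_thresholds generate_variant_thresholds generate_variant_thresholds_alt
  by_cases h : et = ""
  · subst h
    simp only [ne_eq, not_true_eq_false, if_false]
    rw [show (PySem.List.len (pvFilterDecimals vp)) = ((pvFilterDecimals vp).length : Int) from rfl,
      pv_len_filterDecimals]
    set k := (PySem.Str.splitlines vp).countP (fun line => PySem.Str.isIn "." line) with hk
    rw [show PySem.Int.floordiv (k : Int) 2 = ((k / 2 : Nat) : Int) by
      exact_mod_cast PySem.Int.floordiv_natCast k 2]
    rw [PySem.List.pyRange_zero_natCast]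
    rw [List.map_map]
    have hB := pv_loop_inv (PySem.Str.splitlines vp) 0 false
    simp only [List.range_zero, List.map_nil, Nat.zero_add, if_neg (Bool.false_ne_true),
      Nat.add_zero] at hB
    rw [hB, ← hk]
    rfl
  · simp [h]
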